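-- pv_equiv track=rewrite | github.com/yoonseocho/Algorithm | 프로그래머스/2/131127. 할인 행사/할인 행사.py | solution
-- ===== SOURCE A (Python) =====
-- from collections import Counter
--
-- def solution(want, number, discount):
--     possible = 0
--     target = dict(zip(want, number))
--     memo = Counter(discount[:10])
--
--     if memo == target:
--         possible += 1
--
--     for i in range(1, len(discount)-9):
--         prev_item = discount[i-1]
--         next_item = discount[i+9]
--
--         memo[prev_item] -= 1
--         if memo[prev_item] == 0:
--             del memo[prev_item]
--
--         memo[next_item] += 1
--
--         if memo == target:
--             possible += 1
--     return possible
-- ===== SOURCE B (Python) =====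
-- from collections import Counter
--
-- def solution(want, number, discount):
--     target = dict(zip(want, number))
--     return sum(Counter(discount[i:i+10]) == target
--                for i in range(len(discount) - 9))
-- ===== Notes on version B (the rewrite author's own statement) =====
-- stated objective: simpler
-- what changed: Replaces the stateful sliding Counter (incremental decrement/delete/increment plus a separate pre-loop check of window 0) with one uniform comprehension that recounts each full 10-item window from scratch and compares it to the target dict.
-- intended difference: On discount lists shorter than 10 whose item counts exactly equal the want/number mapping, A returns 1 because it unconditionally checks the partial first window, while B returns 0; B's value is intended since the task counts full 10-day windows. — e.g. on solution(["a"], [1], ["a"]): A returns 1, B returns 0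
import Mathlib
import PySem

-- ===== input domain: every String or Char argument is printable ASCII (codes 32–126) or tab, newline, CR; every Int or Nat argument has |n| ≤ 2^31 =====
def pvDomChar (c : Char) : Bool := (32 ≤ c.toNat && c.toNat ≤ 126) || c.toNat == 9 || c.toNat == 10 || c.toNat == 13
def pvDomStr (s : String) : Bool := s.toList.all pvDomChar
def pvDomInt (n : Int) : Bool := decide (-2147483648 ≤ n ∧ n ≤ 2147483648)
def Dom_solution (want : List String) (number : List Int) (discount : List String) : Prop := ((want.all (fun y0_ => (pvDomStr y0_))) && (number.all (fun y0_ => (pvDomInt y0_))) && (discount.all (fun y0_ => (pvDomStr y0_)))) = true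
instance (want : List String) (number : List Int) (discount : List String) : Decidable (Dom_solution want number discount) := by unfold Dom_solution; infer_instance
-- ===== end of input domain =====

-- B recounts every full 10-item window from scratch instead of A's stateful sliding Counter; objective: simpler (not faster).

-- ===== PORT A =====
-- Python's `memo == target` (dict equality: same length and same key→value lookups); shared by both ports.
def pvDictEq (d t : PySem.Dict String Int) : Bool :=
  d.size == t.size && d.items.all (fun p => t.get? p.1 == some p.2)

-- the body of A's `for i in range(1, len(discount)-9)` loop, state = (possible, memo)
def pvStepA (target : PySem.Dict String Int) (discount : List String)
    (st : Int × PySem.Dict String Int) (i : Int) : Int × PySem.Dict String Int :=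
  let prevItem := PySem.List.pyGetD discount (i - 1) ""
  let nextItem := PySem.List.pyGetD discount (i + 9) ""
  let m1 := st.2.modify prevItem 0 (· - 1)
  let m2 := if m1.getD prevItem 0 == 0 then m1.erase prevItem else m1
  let m3 := m2.modify nextItem 0 (· + 1)
  (if pvDictEq m3 target then st.1 + 1 else st.1, m3)

def solution (want : List String) (number : List Int) (discount : List String) : Int :=
  let target := PySem.Dict.ofList (want.zip number)
  let memo := PySem.Dict.counter (PySem.List.slice discount (some 0) (some 10))
  let possible : Int := if pvDictEq memo target then 1 else 0
  ((PySem.List.pyRange 1 ((discount.length : Int) - 9)).foldl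
      (pvStepA target discount) (possible, memo)).1

-- ===== PORT B =====
def solution_alt (want : List String) (number : List Int) (discount : List String) : Int :=
  let target := PySem.Dict.ofList (want.zip number)
  (PySem.List.pyRange 0 ((discount.length : Int) - 9)).foldl
    (fun possible i =>
      if pvDictEq (PySem.Dict.counter (PySem.List.slice discount (some i) (some (i + 10)))) target
      then possible + 1 else possible) 0

-- ===== PRECONDITION & SPEC =====
-- On discount lists shorter than 10 whose item counts exactly equal the want/number mapping, A returns 1
-- (it unconditionally checks the partial first window), while B returns 0; B's value is intended since the
-- task counts full 10-day windows.
def D_solution (want : List String) (number : List Int) (discount : List String) : Prop :=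
  let t := PySem.Dict.ofList (want.zip number)
  discount.length < 10 ∧ (0 : Int) ∉ t.values ∧
    ∀ k ∈ discount ++ want, (discount.count k : Int) = t.getD k 0
instance (want : List String) (number : List Int) (discount : List String) : Decidable (D_solution want number discount) := by unfold D_solution; infer_instance

def Spec_solution (want : List String) (number : List Int) (discount : List String) (out : Int) : Prop := ¬ D_solution want number discount → out = solution_alt want number discount
instance (want : List String) (number : List Int) (discount : List String) (out : Int) : Decidable (Spec_solution want number discount out) := by unfold Spec_solution; infer_instance

def pvDiffWitness_solution : List String × List Int × List String := (["a"], [1], ["a"])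
def pvDiffWitnessOut_solution : Int × Int := (1, 0)

-- ===== CLAIM (what is proved, stated in full; the proofs are below) =====
def Claim_unchanged_solution : Prop := ∀ (want : List String) (number : List Int) (discount : List String), Dom_solution want number discount → Spec_solution want number discount (solution want number discount)
def Claim_changed_solution : Prop := Dom_solution (pvDiffWitness_solution.1) (pvDiffWitness_solution.2.1) (pvDiffWitness_solution.2.2) ∧ D_solution (pvDiffWitness_solution.1) (pvDiffWitness_solution.2.1) (pvDiffWitness_solution.2.2) ∧ solution (pvDiffWitness_solution.1) (pvDiffWitness_solution.2.1) (pvDiffWitness_solution.2.2) = pvDiffWitnessOut_solution.1 ∧ solution_alt (pvDiffWitness_solution.1) (pvDiffWitness_solution.2.1) (pvDiffWitness_solution.2.2) = pvDiffWitnessOut_solution.2 ∧ pvDiffWitnessOut_solution.1 ≠ pvDiffWitnessOut_solution.2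
def Claim_exact_solution : Prop := ∀ (want : List String) (number : List Int) (discount : List String), Dom_solution want number discount → D_solution want number discount → solution want number discount ≠ solution_alt want number discount

-- ===== LEMMAS AND PROOFS =====

-- the 10-item window starting at j
def pvWindow (discount : List String) (j : Nat) : List String := (discount.drop j).take 10

def pvMatch (target : PySem.Dict String Int) (discount : List String) (j : Nat) : Bool :=
  pvDictEq (PySem.Dict.counter (pvWindow discount j)) target

-- keys of a dict built by a fold of inserts come from the seed or the inserted pairs
theorem pv_keys_foldl_insert_sub (ps : List (String × Int)) (d : PySem.Dict String Int) :
    ∀ k ∈ (ps.foldl (fun acc p => acc.insert p.1 p.2) d).keys, k ∈ d.keys ∨ k ∈ ps.map Prod.fst := by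
  induction ps generalizing d with
  | nil => intro k hk; exact Or.inl hk
  | cons p ps ih =>
    intro k hk
    rcases ih (d.insert p.1 p.2) k hk with h | h
    · rcases (PySem.Dict.mem_keys_insert _ _ _ _).mp h with h | h
      · exact Or.inr (by simp [h])
      · exact Or.inl h
    · right
      simp only [List.map_cons, List.mem_cons]
      exact Or.inr h

theorem pv_keys_ofList_zip_sub (want : List String) (number : List Int) :
    ∀ k ∈ (PySem.Dict.ofList (want.zip number)).keys, k ∈ want := by
  intro k hk
  rcases pv_keys_foldl_insert_sub (want.zip number) PySem.Dict.empty k hk with h | h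
  · simp [PySem.Dict.keys_empty] at h
  · obtain ⟨⟨a, b⟩, hab, rfl⟩ := List.mem_map.mp h
    exact (List.of_mem_zip hab).1

-- a value stored at a key is among the dict's values
theorem pv_getD_mem_values (t : PySem.Dict String Int) (k : String) (hk : k ∈ t.keys) :
    t.getD k 0 ∈ t.values := by
  have hne : t.get? k ≠ none := fun hn =>
    ((PySem.Dict.get?_eq_none_iff_not_mem_keys t k).mp hn) hk
  obtain ⟨v, hv⟩ := Option.ne_none_iff_exists'.mp hne
  have := PySem.Dict.mem_items_of_get?_eq_some t hv
  have hvv : v ∈ t.values := by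
    simp only [PySem.Dict.values]
    exact List.mem_map.mpr ⟨(k, v), this, rfl⟩
  simpa [PySem.Dict.getD, hv] using hvv

-- Counter(w) == t, characterised by counts (t's keys assumed unique and drawn from ws)
theorem pvDictEq_counter_iff (w : List String) (t : PySem.Dict String Int)
    (hnd : t.keys.Nodup) (ws : List String) (hks : ∀ k ∈ t.keys, k ∈ ws) :
    pvDictEq (PySem.Dict.counter w) t = true ↔
      ((0 : Int) ∉ t.values ∧ ∀ k ∈ w ++ ws, (w.count k : Int) = t.getD k 0) := by
  have hsz : (PySem.Dict.counter w).size = (PySem.Set.ofList w).length := by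
    simp [PySem.Dict.size, PySem.Dict.items_counter]
  have htsz : t.size = t.keys.length := by
    simp [PySem.Dict.size, PySem.Dict.keys]
  unfold pvDictEq
  rw [PySem.Dict.items_counter, List.all_map, hsz, htsz]
  simp only [Bool.and_eq_true, beq_iff_eq, List.all_eq_true, Function.comp]
  constructor
  · rintro ⟨hlen, hall⟩
    have hget : ∀ k ∈ PySem.Set.ofList w, t.get? k = some ((w.count k : Int)) := by
      intro k hk; simpa using hall k hk
    have hsub : PySem.Set.ofList w ⊆ t.keys := by
      intro k hk
      by_contra hc
      have := (PySem.Dict.get?_eq_none_iff_not_mem_keys t k).mpr hc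
      rw [hget k hk] at this; exact Option.some_ne_none _ this
    have hperm : (PySem.Set.ofList w).Perm t.keys :=
      ((PySem.Set.nodup_ofList w).subperm hsub).perm_of_length_le (le_of_eq hlen.symm)
    have hcnt : ∀ k, (w.count k : Int) = t.getD k 0 := by
      intro k
      by_cases hk : k ∈ w
      · have hk' : k ∈ PySem.Set.ofList w := (PySem.Set.mem_ofList w k).mpr hk
        rw [PySem.Dict.getD, hget k hk']; rfl
      · have hk' : k ∉ t.keys := fun hc =>
          hk ((PySem.Set.mem_ofList w k).mp (hperm.mem_iff.mpr hc))
        have hn := (PySem.Dict.get?_eq_none_iff_not_mem_keys t k).mpr hk'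
        simp [PySem.Dict.getD, hn, List.count_eq_zero_of_not_mem hk]
    refine ⟨?_, fun k _ => hcnt k⟩
    intro h0
    obtain ⟨⟨k, v⟩, hkv, hv0⟩ := List.mem_map.mp h0
    have hkk : k ∈ t.keys := PySem.Dict.mem_keys_of_mem_items t hkv
    have hkw : k ∈ w := (PySem.Set.mem_ofList w k).mp (hperm.mem_iff.mpr hkk)
    have hv : t.get? k = some v := PySem.Dict.get?_of_mem_items t hkv hnd
    have hgd : t.getD k 0 = v := by simp [PySem.Dict.getD, hv]
    have hc := hcnt k
    rw [hgd] at hc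
    have hv' : v = 0 := hv0
    have := List.count_pos_iff.mpr hkw
    omega
  · rintro ⟨h0, hall⟩
    have hcnt : ∀ k, k ∈ w ∨ k ∈ ws → (w.count k : Int) = t.getD k 0 := by
      intro k hk
      exact hall k (List.mem_append.mpr hk)
    have hmem : ∀ k, k ∈ PySem.Set.ofList w ↔ k ∈ t.keys := by
      intro k
      rw [PySem.Set.mem_ofList]
      constructor
      · intro hk
        by_contra hc
        have hn := (PySem.Dict.get?_eq_none_iff_not_mem_keys t k).mpr hc
        have hgd : t.getD k 0 = 0 := by simp [PySem.Dict.getD, hn]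
        have := hcnt k (Or.inl hk)
        rw [hgd] at this
        have := List.count_pos_iff.mpr hk
        omega
      · intro hk
        have hgd := pv_getD_mem_values t k hk
        have hne : t.getD k 0 ≠ 0 := fun hz => h0 (hz ▸ hgd)
        have := hcnt k (Or.inr (hks k hk))
        have : w.count k ≠ 0 := by omega
        exact List.count_pos_iff.mp (Nat.pos_of_ne_zero this)
    have hperm : (PySem.Set.ofList w).Perm t.keys :=
      (List.perm_ext_iff_of_nodup (PySem.Set.nodup_ofList w) hnd).mpr hmem
    refine ⟨hperm.length_eq, ?_⟩
    intro k hk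
    have hkk : k ∈ t.keys := (hmem k).mp hk
    have hne : t.get? k ≠ none := fun hn =>
      ((PySem.Dict.get?_eq_none_iff_not_mem_keys t k).mp hn) hkk
    obtain ⟨v, hv⟩ := Option.ne_none_iff_exists'.mp hne
    have hgd : t.getD k 0 = v := by simp [PySem.Dict.getD, hv]
    have := hcnt k (Or.inl ((PySem.Set.mem_ofList w k).mp hk))
    rw [hgd] at this
    simp [hv, ← this]

-- the loop invariant: d looks up like Counter(window) and carries no zero counts
def pvR (w : List String) (d : PySem.Dict String Int) : Prop :=
  d.keys.Nodup ∧ (∀ k, d.getD k 0 = (w.count k : Int)) ∧ (∀ k ∈ d.keys, d.getD k 0 ≠ 0)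

theorem pvR_counter (w : List String) : pvR w (PySem.Dict.counter w) := by
  refine ⟨PySem.Dict.nodup_keys_counter w, fun k => PySem.Dict.getD_counter w k, fun k hk => ?_⟩
  rw [PySem.Dict.keys_counter, PySem.Set.mem_ofList] at hk
  rw [PySem.Dict.getD_counter]
  have := List.count_pos_iff.mpr hk
  omega

theorem pv_mem_keys_iff {w : List String} {d : PySem.Dict String Int} (h : pvR w d) (k : String) :
    k ∈ d.keys ↔ k ∈ w := by
  obtain ⟨hnd, hget, hnz⟩ := h
  constructor
  · intro hk
    have := hnz k hk
    rw [hget k] at this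
    have : w.count k ≠ 0 := by intro h0; rw [h0] at this; simp at this
    exact List.count_pos_iff.mp (Nat.pos_of_ne_zero this)
  · intro hk
    by_contra hmem
    have hnone : d.get? k = none := (PySem.Dict.get?_eq_none_iff_not_mem_keys d k).mpr hmem
    have h0 : d.getD k 0 = 0 := by simp [PySem.Dict.getD, hnone]
    rw [hget k] at h0
    have := List.count_pos_iff.mpr hk
    omega

theorem pvDictEq_congr {w : List String} {d : PySem.Dict String Int} (h : pvR w d)
    (t : PySem.Dict String Int) : pvDictEq d t = pvDictEq (PySem.Dict.counter w) t := by
  have hmem := pv_mem_keys_iff h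
  obtain ⟨hnd, hget, -⟩ := h
  unfold pvDictEq
  have hperm : d.keys.Perm (PySem.Set.ofList w) :=
    (List.perm_ext_iff_of_nodup hnd (PySem.Set.nodup_ofList w)).mpr
      (fun a => (hmem a).trans ((PySem.Set.mem_ofList w a)).symm)
  have hsz : d.size = (PySem.Dict.counter w).size := by
    have h1 : d.size = d.keys.length := by simp [PySem.Dict.size, PySem.Dict.keys]
    have h2 : (PySem.Dict.counter w).size = (PySem.Set.ofList w).length := by
      simp [PySem.Dict.size, PySem.Dict.items_counter]
    rw [h1, h2, hperm.length_eq]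
  have hall : d.items.all (fun p => t.get? p.1 == some p.2)
      = (PySem.Dict.counter w).items.all (fun p => t.get? p.1 == some p.2) := by
    rw [PySem.Dict.items_eq_map_keys d hnd 0, PySem.Dict.items_counter, List.all_map, List.all_map]
    apply Bool.eq_iff_iff.mpr
    simp only [List.all_eq_true, Function.comp]
    constructor
    · intro hF k hk
      have hk' : k ∈ d.keys := (hmem k).mpr ((PySem.Set.mem_ofList w k).mp hk)
      have := hF k hk'
      rwa [hget k] at this
    · intro hF k hk
      have hk' : k ∈ PySem.Set.ofList w := (PySem.Set.mem_ofList w k).mpr ((hmem k).mp hk)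
      have := hF k hk'
      rwa [← hget k] at this
  rw [hsz, hall]

theorem pv_find?_filter (l : List (String × Int)) (k k' : String) (hne : k' ≠ k) :
    (l.filter (fun p => !(p.1 == k))).find? (fun p => p.1 == k')
      = l.find? (fun p => p.1 == k') := by
  induction l with
  | nil => rfl
  | cons a l ih =>
    by_cases h1 : a.1 = k
    · have h2 : a.1 ≠ k' := by rw [h1]; exact Ne.symm hne
      simp [h1, ih, Ne.symm hne, beq_iff_eq]
    · by_cases h2 : a.1 = k'
      · simp [h2, hne]
      · simp [h1, h2, ih]

theorem pv_get?_erase (d : PySem.Dict String Int) (k k' : String) :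
    (d.erase k).get? k' = if k' = k then none else d.get? k' := by
  by_cases h : k' = k
  · subst h
    rw [if_pos rfl]
    obtain ⟨l⟩ := d
    simp only [PySem.Dict.erase, PySem.Dict.get?]
    rw [List.find?_eq_none.mpr]
    · rfl
    · intro x hx
      simp only [List.mem_filter, Bool.not_eq_eq_eq_not, Bool.not_true, beq_eq_false_iff_ne] at hx
      simp [hx.2]
  · rw [if_neg h]
    obtain ⟨l⟩ := d
    simp only [PySem.Dict.erase, PySem.Dict.get?]
    rw [pv_find?_filter l k k' h]

theorem pv_mem_keys_erase {d : PySem.Dict String Int} {k k' : String}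
    (h : k' ∈ (d.erase k).keys) : k' ∈ d.keys ∧ k' ≠ k := by
  obtain ⟨l⟩ := d
  simp only [PySem.Dict.erase, PySem.Dict.keys, List.mem_map, List.mem_filter,
    Bool.not_eq_eq_eq_not, Bool.not_true, beq_eq_false_iff_ne] at h ⊢
  obtain ⟨p, ⟨hp, hpk⟩, rfl⟩ := h
  exact ⟨⟨p, hp, rfl⟩, hpk⟩

theorem pv_window_pred (discount : List String) (j : Nat) (hj : 1 ≤ j) (hn : j + 10 ≤ discount.length) :
    pvWindow discount (j - 1) = discount.getD (j - 1) "" :: (discount.drop j).take 9 := by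
  unfold pvWindow
  have hlt : j - 1 < discount.length := by omega
  rw [List.drop_eq_getElem_cons hlt, show j - 1 + 1 = j from by omega,
    show (10 : Nat) = 9 + 1 from rfl, List.take_succ_cons,
    List.getD_eq_getElem discount "" hlt]

theorem pv_window_succ (discount : List String) (j : Nat) (hn : j + 10 ≤ discount.length) :
    pvWindow discount j = (discount.drop j).take 9 ++ [discount.getD (j + 9) ""] := by
  unfold pvWindow
  have hlt : j + 9 < discount.length := by omega
  rw [show (10 : Nat) = 9 + 1 from rfl, List.take_add_one, List.getElem?_drop,
    List.getElem?_eq_getElem hlt, List.getD_eq_getElem discount "" hlt]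
  rfl

theorem pv_pyRange_nil {a b : Int} (h : b ≤ a) : PySem.List.pyRange a b = [] := by
  simp [PySem.List.pyRange, show ¬ (a < b) from not_lt.mpr h]

theorem pv_slide (prev next : String) (mid : List String) (d : PySem.Dict String Int)
    (hR : pvR (prev :: mid) d) :
    pvR (mid ++ [next])
      ((if (d.modify prev 0 (· - 1)).getD prev 0 == 0
          then (d.modify prev 0 (· - 1)).erase prev
          else d.modify prev 0 (· - 1)).modify next 0 (· + 1)) := by
  obtain ⟨hnd, hget, hnz⟩ := hR
  set m1 := d.modify prev 0 (· - 1) with hm1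
  set m2 := (if m1.getD prev 0 == 0 then m1.erase prev else m1) with hm2
  have hm1get : ∀ k, m1.getD k 0 = if k = prev then d.getD prev 0 - 1 else d.getD k 0 := by
    intro k; rw [hm1, PySem.Dict.getD_modify]
  have hm2get : ∀ k, m2.getD k 0 = m1.getD k 0 := by
    intro k
    rw [hm2]; split
    · next h0 =>
      have h0' : m1.getD prev 0 = 0 := by simpa using h0
      by_cases hk : k = prev
      · rw [hk, h0']
        simp [PySem.Dict.getD, pv_get?_erase]
      · simp [PySem.Dict.getD, pv_get?_erase, hk]
    · rfl
  have hcnt0 : ∀ k, ((prev :: mid).count k : Int)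
      = (mid.count k : Int) + (if k = prev then 1 else 0) := by
    intro k
    rw [List.count_cons]
    by_cases hk : k = prev
    · simp [hk]
    · simp [hk, Ne.symm hk]
  have hcnt1 : ∀ k, ((mid ++ [next]).count k : Int)
      = (mid.count k : Int) + (if k = next then 1 else 0) := by
    intro k
    rw [List.count_append]
    by_cases hk : k = next
    · simp [hk]
    · simp [hk, Ne.symm hk]
  have hm2cnt : ∀ k, m2.getD k 0 = (mid.count k : Int) := by
    intro k
    rw [hm2get, hm1get]
    by_cases hk : k = prev
    · rw [if_pos hk, hget prev, hk]
      have := hcnt0 prev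
      rw [if_pos rfl] at this
      omega
    · rw [if_neg hk, hget k]
      have := hcnt0 k
      rw [if_neg hk] at this
      omega
  have hm1mem : ∀ k, k ∈ m1.keys ↔ (k = prev ∨ k ∈ d.keys) := by
    intro k
    rw [hm1, PySem.Dict.keys_modify]
    exact PySem.Dict.mem_keys_insert _ _ _ _
  have hm1nd : m1.keys.Nodup := by
    rw [hm1, PySem.Dict.keys_modify]
    exact PySem.Dict.nodup_keys_insert _ _ _ hnd
  have hm2mem : ∀ k, k ∈ m2.keys → k ∈ m1.keys ∧ (m1.getD prev 0 = 0 → k ≠ prev) := by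
    intro k hk
    rw [hm2] at hk
    revert hk; split
    · intro hk
      have := pv_mem_keys_erase hk
      exact ⟨this.1, fun _ => this.2⟩
    · next h0 =>
      intro hk
      exact ⟨hk, fun hz => absurd (by simp [hz] : (m1.getD prev 0 == 0) = true) h0⟩
  have hm2nd : m2.keys.Nodup := by
    rw [hm2]; split
    · have hsub : (m1.erase prev).keys.Sublist m1.keys :=
        List.filter_sublist.map _
      exact hsub.nodup hm1nd
    · exact hm1nd
  refine ⟨?_, ?_, ?_⟩
  · rw [PySem.Dict.keys_modify]
    exact PySem.Dict.nodup_keys_insert _ _ _ hm2nd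
  · intro k
    rw [PySem.Dict.getD_modify, hcnt1 k]
    by_cases hk : k = next
    · rw [if_pos hk, if_pos hk, hk, hm2cnt next]
    · rw [if_neg hk, if_neg hk, hm2cnt k]; omega
  · intro k hk
    rw [PySem.Dict.keys_modify] at hk
    have hk' := (PySem.Dict.mem_keys_insert _ _ _ _).mp hk
    have hval : ((if (d.modify prev 0 (· - 1)).getD prev 0 == 0
          then (d.modify prev 0 (· - 1)).erase prev
          else d.modify prev 0 (· - 1)).modify next 0 (· + 1)).getD k 0
        = ((mid ++ [next]).count k : Int) := by
      rw [PySem.Dict.getD_modify, hcnt1 k]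
      by_cases hk2 : k = next
      · rw [if_pos hk2, if_pos hk2, hk2, hm2cnt next]
      · rw [if_neg hk2, if_neg hk2, hm2cnt k]; omega
    rw [hval]
    have hkmem : k ∈ mid ++ [next] := by
      rcases hk' with hk' | hk'
      · exact List.mem_append_right _ (by simp [hk'])
      · obtain ⟨hk1, himp⟩ := hm2mem k hk'
        by_cases hkp : k = prev
        · have hz : m1.getD prev 0 ≠ 0 := fun hz => (himp hz) hkp
          rw [hm1get, if_pos rfl, hget prev] at hz
          have := hcnt0 prev
          rw [if_pos rfl] at this
          have hmidpos : mid.count prev ≠ 0 := by omega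
          rw [hkp]
          exact List.mem_append_left _ (List.count_pos_iff.mp (Nat.pos_of_ne_zero hmidpos))
        · have hkd : k ∈ d.keys := by
            rcases (hm1mem k).mp hk1 with h | h
            · exact absurd h hkp
            · exact h
          have := hnz k hkd
          rw [hget k] at this
          have hc := hcnt0 k
          rw [if_neg hkp] at hc
          have hmidpos : mid.count k ≠ 0 := by omega
          exact List.mem_append_left _ (List.count_pos_iff.mp (Nat.pos_of_ne_zero hmidpos))
    have := List.count_pos_iff.mpr hkmem
    omega

theorem pvStepA_R (t : PySem.Dict String Int) (discount : List String) (j : Nat)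
    (hj : 1 ≤ j) (hn : j + 10 ≤ discount.length)
    {p : Int} {d : PySem.Dict String Int} (hR : pvR (pvWindow discount (j - 1)) d) :
    pvR (pvWindow discount j) (pvStepA t discount (p, d) (j : Int)).2 ∧
    (pvStepA t discount (p, d) (j : Int)).1 = p + (if pvMatch t discount j then 1 else 0) := by
  have hj1 : ((j : Int) - 1) = ((j - 1 : Nat) : Int) := by omega
  have hj9 : ((j : Int) + 9) = ((j + 9 : Nat) : Int) := by push_cast; ring
  have hw0 := pv_window_pred discount j hj hn
  have hw1 := pv_window_succ discount j hn
  have hR' : pvR (discount.getD (j - 1) "" :: (discount.drop j).take 9) d := by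
    rw [← hw0]; exact hR
  have hslide := pv_slide (discount.getD (j - 1) "") (discount.getD (j + 9) "")
    ((discount.drop j).take 9) d hR'
  constructor
  · simp only [pvStepA, hj1, hj9, PySem.List.pyGetD_natCast]
    rw [hw1]
    exact hslide
  · simp only [pvStepA, hj1, hj9, PySem.List.pyGetD_natCast]
    rw [pvDictEq_congr hslide t]
    unfold pvMatch
    rw [hw1]
    split <;> ring

theorem pv_loopA (t : PySem.Dict String Int) (discount : List String) :
    ∀ (c j : Nat) (p : Int) (d : PySem.Dict String Int), 1 ≤ j →
      j + c = discount.length - 9 → 10 ≤ discount.length →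
      pvR (pvWindow discount (j - 1)) d →
      ((PySem.List.pyRange (j : Int) ((discount.length : Int) - 9)).foldl
          (pvStepA t discount) (p, d)).1
        = p + (((List.range' j c).filter (pvMatch t discount)).length : Int) := by
  intro c
  induction c with
  | zero =>
    intro j p d hj hc hlen hR
    have hb : ((discount.length : Int) - 9) = (j : Int) := by omega
    rw [hb, pv_pyRange_nil (le_refl _)]
    simp
  | succ c ih =>
    intro j p d hj hc hlen hR
    have hlt : (j : Int) < (discount.length : Int) - 9 := by omega
    rw [PySem.List.pyRange_one_cons hlt, List.foldl_cons]
    have hn10 : j + 10 ≤ discount.length := by omega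
    obtain ⟨hR', hfst⟩ := pvStepA_R t discount j hj hn10 (p := p) (d := d) hR
    have hpair : pvStepA t discount (p, d) (j : Int)
        = ((pvStepA t discount (p, d) (j : Int)).1, (pvStepA t discount (p, d) (j : Int)).2) := rfl
    rw [hpair, hfst]
    have hcast : (j : Int) + 1 = ((j + 1 : Nat) : Int) := by push_cast; ring
    have hR'' : pvR (pvWindow discount (j + 1 - 1)) (pvStepA t discount (p, d) (j : Int)).2 := by
      simpa using hR'
    rw [hcast, ih (j + 1) (p + if pvMatch t discount j then 1 else 0)
      ((pvStepA t discount (p, d) (j : Int)).2) (by omega) (by omega) hlen hR'']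
    rw [List.range'_succ, List.filter_cons]
    split <;> (push_cast [List.length_cons]; try ring)

theorem pv_loopB (t : PySem.Dict String Int) (discount : List String) (M : Nat) :
    ∀ (c j : Nat) (p : Int), j + c = M →
      (PySem.List.pyRange (j : Int) (M : Int)).foldl
        (fun possible i =>
          if pvDictEq (PySem.Dict.counter (PySem.List.slice discount (some i) (some (i + 10)))) t
          then possible + 1 else possible) p
        = p + (((List.range' j c).filter (pvMatch t discount)).length : Int) := by
  intro c
  induction c with
  | zero =>
    intro j p hc
    rw [pv_pyRange_nil (by omega)]
    simp
  | succ c ih =>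
    intro j p hc
    have hlt : (j : Int) < (M : Int) := by omega
    rw [PySem.List.pyRange_one_cons hlt, List.foldl_cons]
    have hslice : PySem.List.slice discount (some (j : Int)) (some ((j : Int) + 10))
        = (discount.drop j).take 10 := by
      simpa using PySem.List.slice_natCast_add discount j 10
    have hcast : (j : Int) + 1 = ((j + 1 : Nat) : Int) := by push_cast; ring
    simp only [hslice, hcast]
    rw [ih (j + 1) (if pvDictEq (PySem.Dict.counter ((discount.drop j).take 10)) t
        then p + 1 else p) (by omega)]
    rw [List.range'_succ, List.filter_cons]
    simp only [pvMatch, pvWindow]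
    split <;> (push_cast [List.length_cons]; try ring)

theorem pv_slice0 (discount : List String) :
    PySem.List.slice discount (some 0) (some 10) = pvWindow discount 0 := by
  rw [PySem.List.slice_zero_start, PySem.List.slice_to discount (by norm_num : (0:Int) ≤ 10)]
  simp [pvWindow]

-- ===== VERDICT (by name: the statements are the Claim_ definitions above) =====
theorem solution_spec : Claim_unchanged_solution := by
  intro want number discount _ hnD
  show solution want number discount = solution_alt want number discount
  simp only [solution, solution_alt]
  set t := PySem.Dict.ofList (want.zip number) with ht
  rw [pv_slice0]
  by_cases hlen : discount.length < 10
  · -- no full window: A's loop and B's loop are both empty; A's pre-loop check cannot fire (¬D_)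
    rw [pv_pyRange_nil (by omega : (discount.length : Int) - 9 ≤ 1),
      pv_pyRange_nil (by omega : (discount.length : Int) - 9 ≤ 0)]
    simp only [List.foldl_nil]
    have hwin : pvWindow discount 0 = discount := by
      simp [pvWindow, List.take_of_length_le (by omega : discount.length ≤ 10)]
    rw [hwin]
    have hfalse : pvDictEq (PySem.Dict.counter discount) t = false := by
      by_contra hc
      have htrue : pvDictEq (PySem.Dict.counter discount) t = true := by
        revert hc; cases pvDictEq (PySem.Dict.counter discount) t <;> simp
      obtain ⟨h0, hall⟩ := (pvDictEq_counter_iff discount t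
          (PySem.Dict.nodup_keys_ofList _) want
          (pv_keys_ofList_zip_sub want number)).mp htrue
      exact hnD ⟨hlen, h0, hall⟩
    rw [hfalse]
    simp
  · replace hlen : 10 ≤ discount.length := by omega
    have hR0 : pvR (pvWindow discount (1 - 1)) (PySem.Dict.counter (pvWindow discount 0)) := by
      simpa using pvR_counter (pvWindow discount 0)
    have hA := pv_loopA t discount (discount.length - 10) 1
      (if pvDictEq (PySem.Dict.counter (pvWindow discount 0)) t then 1 else 0)
      (PySem.Dict.counter (pvWindow discount 0)) (le_refl 1) (by omega) (by omega) hR0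
    rw [show ((1 : Nat) : Int) = 1 from by simp] at hA
    rw [hA]
    have hM : ((discount.length : Int) - 9) = ((discount.length - 9 : Nat) : Int) := by omega
    have hB := pv_loopB t discount (discount.length - 9) (discount.length - 9) 0 0 (by omega)
    rw [Nat.cast_zero] at hB
    rw [hM, hB]
    rw [show discount.length - 9 = (discount.length - 10) + 1 from by omega,
      List.range'_succ, List.filter_cons]
    simp only [pvMatch]
    split <;> (push_cast [List.length_cons]; try ring)

theorem solution_changed : Claim_changed_solution := by
  unfold Claim_changed_solution; decide

theorem solution_tight : Claim_exact_solution := by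
  intro want number discount _ hD
  obtain ⟨hlen, h1, h2⟩ := hD
  have hB : solution_alt want number discount = 0 := by
    simp only [solution_alt]
    rw [pv_pyRange_nil (by omega : (discount.length : Int) - 9 ≤ 0)]
    rfl
  have hA : solution want number discount = 1 := by
    simp only [solution]
    rw [pv_slice0]
    have hwin : pvWindow discount 0 = discount := by
      simp [pvWindow, List.take_of_length_le (by omega : discount.length ≤ 10)]
    rw [hwin]
    have htrue : pvDictEq (PySem.Dict.counter discount)
        (PySem.Dict.ofList (want.zip number)) = true :=
      (pvDictEq_counter_iff discount _ (PySem.Dict.nodup_keys_ofList _) want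
        (pv_keys_ofList_zip_sub want number)).mpr ⟨h1, h2⟩
    rw [pv_pyRange_nil (by omega : (discount.length : Int) - 9 ≤ 1)]
    simp [htrue]
  rw [hA, hB]
  decide
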